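-- pv_equiv track=rewrite | github.com/cappe987/advent-of-code | 2022/aoclib.py | iter_group
-- ===== SOURCE A (Python) =====
-- def iter_group(iterator, num):
--     result = []
--     tmp = []
--     for i, item in enumerate(iterator, start=1):
--         if i % num == 0:
--             tmp.append(item)
--             result.append(tmp)
--             tmp = []
--         else:
--             tmp.append(item)
--     if len(tmp) > 0:
--         result.append(tmp)
--     return result
-- ===== SOURCE B (Python) =====
-- from itertools import islice
--
-- def iter_group(iterator, num):
--     it = iter(iterator)
--     result = []
--     while True:
--         chunk = list(islice(it, num))
--         if not chunk:
--             break
--         result.append(chunk)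
--     return result
-- ===== Notes on version B (the rewrite author's own statement) =====
-- stated objective: idiomatic
-- what changed: Replaces the enumerate-with-modulo counter and flushed temp buffer by the standard itertools.islice batching loop that pulls fixed-size chunks directly from the iterator.
-- outside the precondition, e.g. on iter_group([1, 2, 3], -2): A returns [[1, 2], [3]], B raises ValueError; on iter_group([], -1): A returns [], B raises ValueError; on iter_group([1], 0): A raises ZeroDivisionError, B returns []
import Mathlib
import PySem

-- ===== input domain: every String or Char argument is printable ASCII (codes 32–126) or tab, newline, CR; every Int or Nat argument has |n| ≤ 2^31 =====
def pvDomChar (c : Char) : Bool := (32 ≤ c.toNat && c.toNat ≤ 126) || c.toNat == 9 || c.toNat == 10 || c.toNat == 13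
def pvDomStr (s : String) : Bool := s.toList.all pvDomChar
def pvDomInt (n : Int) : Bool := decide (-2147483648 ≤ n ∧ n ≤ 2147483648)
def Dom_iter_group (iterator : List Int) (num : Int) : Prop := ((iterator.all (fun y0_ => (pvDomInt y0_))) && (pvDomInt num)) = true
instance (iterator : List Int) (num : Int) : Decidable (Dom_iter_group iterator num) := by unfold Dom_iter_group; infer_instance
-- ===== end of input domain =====

-- B groups by pulling fixed-size chunks with itertools.islice instead of a modulo counter with a flushed temp buffer (idiomatic rewrite, same cost).


-- ===== PORT A =====
-- fold state: (result, tmp, i); i is the 1-based enumerate counter; i % num via PySem.Int.mod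
-- (num = 0 with a non-empty iterator raises ZeroDivisionError in Python: excluded by Pre_)
def iter_group (iterator : List Int) (num : Int) : List (List Int) :=
  let st := iterator.foldl
    (fun (st : List (List Int) × List Int × Int) item =>
      let result := st.1
      let tmp := st.2.1
      let i := st.2.2
      if PySem.Int.mod i num = 0 then
        (result ++ [tmp ++ [item]], [], i + 1)
      else
        (result, tmp ++ [item], i + 1))
    ([], [], 1)
  if st.2.1.length > 0 then st.1 ++ [st.2.1] else st.1

-- ===== PORT B =====
-- while True: chunk = list(islice(it, num)); if not chunk: break; result.append(chunk)
-- islice takes the first num elements and leaves the rest in the iterator;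
-- negative num raises ValueError in Python B (excluded by Pre_), so num.toNat is exact on Pre_.
def iter_group_alt_chunks (l : List Int) (n : Nat) : List (List Int) :=
  if _h : l.take n = [] then []
  else l.take n :: iter_group_alt_chunks (l.drop n) n
termination_by l.length
decreasing_by
  have hl : l ≠ [] := by intro he; simp [he] at _h
  have hn : n ≠ 0 := by intro he; simp [he] at _h
  cases l with
  | nil => exact absurd rfl hl
  | cons a t => simp; omega

def iter_group_alt (iterator : List Int) (num : Int) : List (List Int) :=
  iter_group_alt_chunks iterator num.toNat

-- ===== PRECONDITION & SPEC =====
-- Pre_ excludes num ≤ 0 (except the empty iterator with num = 0, where both return []):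
-- for num = 0 on a non-empty iterator A raises ZeroDivisionError, and for negative num
-- A's grouping by |num| is an accident of Python's floor modulo while B's islice raises ValueError there.
def Pre_iter_group (iterator : List Int) (num : Int) : Prop :=
  1 ≤ num ∨ (iterator = [] ∧ num = 0)
instance (iterator : List Int) (num : Int) : Decidable (Pre_iter_group iterator num) := by
  unfold Pre_iter_group; infer_instance

def pvWitness_iter_group : List Int × Int := ([1, 2, 3, 4, 5], 2)

def Spec_iter_group (iterator : List Int) (num : Int) (out : List (List Int)) : Prop := out = iter_group_alt iterator num
instance (iterator : List Int) (num : Int) (out : List (List Int)) : Decidable (Spec_iter_group iterator num out) := by unfold Spec_iter_group; infer_instance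

-- ===== CLAIM (what is proved, stated in full; the proofs are below) =====
def Claim_equal_iter_group : Prop := ∀ (iterator : List Int) (num : Int), Dom_iter_group iterator num → Pre_iter_group iterator num → Spec_iter_group iterator num (iter_group iterator num)

-- ===== LEMMAS AND PROOFS =====

-- Main invariant: folding A's step over l from state (result, tmp, i), with the counter i
-- consistent with tmp (i ≡ tmp.length + 1 mod num) and tmp not yet full, then finalizing,
-- yields result ++ the islice-chunking of tmp ++ l.
theorem iter_group_fold_inv (num : Int) (hnum : 1 ≤ num) :
    ∀ (l : List Int) (result : List (List Int)) (tmp : List Int) (i : Int),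
      i % num = ((tmp.length : Int) + 1) % num →
      (tmp.length : Int) + 1 ≤ num →
      (let st := l.foldl
        (fun (st : List (List Int) × List Int × Int) item =>
          let result := st.1
          let tmp := st.2.1
          let i := st.2.2
          if PySem.Int.mod i num = 0 then
            (result ++ [tmp ++ [item]], [], i + 1)
          else
            (result, tmp ++ [item], i + 1))
        (result, tmp, i)
       if st.2.1.length > 0 then st.1 ++ [st.2.1] else st.1)
      = result ++ iter_group_alt_chunks (tmp ++ l) num.toNat := by
  intro l
  induction l with
  | nil =>
    intro result tmp i _ hlen
    simp only [List.foldl_nil, List.append_nil]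
    rw [iter_group_alt_chunks]
    have htake : tmp.take num.toNat = tmp := by
      apply List.take_of_length_le; omega
    by_cases htmp : tmp = []
    · subst htmp; simp
    · have : tmp.length > 0 := List.length_pos_iff.mpr htmp
      rw [if_pos this]
      rw [dif_neg (by rw [htake]; exact htmp)]
      rw [htake]
      rw [iter_group_alt_chunks]
      have : tmp.drop num.toNat = [] := by
        apply List.drop_eq_nil_of_le; omega
      simp [this]
  | cons a l ih =>
    intro result tmp i hmod hlen
    have hmodeq : PySem.Int.mod i num = i % num :=
      PySem.Int.mod_eq_emod_of_pos (by omega)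
    simp only [List.foldl_cons]
    by_cases hfull : (tmp.length : Int) + 1 = num
    · -- flush: i % num = 0
      have h0 : i % num = 0 := by rw [hmod, hfull, Int.emod_self]
      rw [hmodeq, h0, if_pos rfl]
      have h1 : (i + 1) % num = (((0 : Nat) : Int) + 1) % num := by
        rw [Int.add_emod, h0]; simp [Int.emod_emod_of_dvd]
      have ih' := ih (result ++ [tmp ++ [a]]) [] (i + 1) (by simpa using h1) (by simp; omega)
      simp only at ih' ⊢
      rw [ih', List.append_assoc]
      congr 1
      have hlentot : tmp.length + 1 = num.toNat := by omega
      conv_rhs => rw [iter_group_alt_chunks]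
      have hsplit : tmp ++ a :: l = (tmp ++ [a]) ++ l := by simp
      have hta : (tmp ++ a :: l).take num.toNat = tmp ++ [a] := by
        rw [hsplit, List.take_append_of_le_length (by simp; omega),
            List.take_of_length_le (by simp; omega)]
      have hda : (tmp ++ a :: l).drop num.toNat = l := by
        rw [hsplit, List.drop_append_of_le_length (by simp; omega),
            List.drop_eq_nil_of_le (by simp; omega)]
        simp
      rw [dif_neg (by rw [hta]; simp), hta, hda]
      simp
    · -- no flush
      have hne : ¬ i % num = 0 := by
        rw [hmod]
        have h1 : ((tmp.length : Int) + 1) % num = (tmp.length : Int) + 1 :=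
          Int.emod_eq_of_lt (by omega) (by omega)
        rw [h1]; omega
      rw [hmodeq, if_neg hne]
      have hlen2 : (((tmp ++ [a]).length : Int)) = (tmp.length : Int) + 1 := by simp
      have h1 : (i + 1) % num = (((tmp ++ [a]).length : Int) + 1) % num := by
        rw [hlen2, Int.add_emod, hmod, ← Int.add_emod]
      have ih' := ih result (tmp ++ [a]) (i + 1) h1 (by rw [hlen2]; omega)
      simp only at ih' ⊢
      rw [ih']
      simp
theorem iter_group_spec : Claim_equal_iter_group := by
  intro iterator num _ hpre
  unfold Spec_iter_group
  rcases hpre with hnum | ⟨hnil, hz⟩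
  · have := iter_group_fold_inv num hnum iterator [] [] 1 (by simp) (by simp; omega)
    simpa [iter_group, iter_group_alt] using this
  · subst hnil hz
    simp [iter_group, iter_group_alt, iter_group_alt_chunks]
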